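-- pv_equiv track=rewrite | github.com/JackG256/JFA-Sim | runLogicND.py | findAndRunJumpOneSide
-- ===== SOURCE A (Python) =====
-- def findAndRunJumpOneSide(jTransitions, currentReadSymbol, currentState, machineStates, inputString):
--     listOfEndpoints = []
--     for entry in jTransitions:
--         if entry[0] == currentState and entry[1] in inputString:
--             listOfEndpoints.append(entry)
--
--     if len(listOfEndpoints) != 1:
--         pass
--         # TODO: implement exception
--
--     if listOfEndpoints[0][2] not in machineStates:
--         pass
--         # TODO: implement exception
--
--     currentState = listOfEndpoints[0][2]
--     currentReadSymbol = listOfEndpoints[0][1]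
--
--     outputString = ""
--     symbolReached = False
--     for symbol in inputString:
--         if symbolReached:
--             outputString += symbol
--
--         if symbol == currentReadSymbol:
--             symbolReached = True
--
--
--
--     # Format: Status,
--     return outputString, currentState
-- ===== SOURCE B (Python) =====
-- def findAndRunJumpOneSide(jTransitions, currentReadSymbol, currentState, machineStates, inputString):
--     matches = [e for e in jTransitions if e[0] == currentState and e[1] in inputString]
--     sym, nextState = matches[0][1], matches[0][2]
--     i = next((k for k, c in enumerate(inputString) if c == sym), None)
--     outputString = inputString[i + 1:] if i is not None else ""
--     return outputString, nextState
-- ===== Notes on version B (the rewrite author's own statement) =====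
-- stated objective: simpler
-- what changed: A's boolean-flag accumulator loop that appends each character after the first occurrence of the symbol is replaced by finding the first index of the matching character and slicing inputString[i+1:]; the transition filter-and-take-first is a comprehension plus [0].
import Mathlib
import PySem

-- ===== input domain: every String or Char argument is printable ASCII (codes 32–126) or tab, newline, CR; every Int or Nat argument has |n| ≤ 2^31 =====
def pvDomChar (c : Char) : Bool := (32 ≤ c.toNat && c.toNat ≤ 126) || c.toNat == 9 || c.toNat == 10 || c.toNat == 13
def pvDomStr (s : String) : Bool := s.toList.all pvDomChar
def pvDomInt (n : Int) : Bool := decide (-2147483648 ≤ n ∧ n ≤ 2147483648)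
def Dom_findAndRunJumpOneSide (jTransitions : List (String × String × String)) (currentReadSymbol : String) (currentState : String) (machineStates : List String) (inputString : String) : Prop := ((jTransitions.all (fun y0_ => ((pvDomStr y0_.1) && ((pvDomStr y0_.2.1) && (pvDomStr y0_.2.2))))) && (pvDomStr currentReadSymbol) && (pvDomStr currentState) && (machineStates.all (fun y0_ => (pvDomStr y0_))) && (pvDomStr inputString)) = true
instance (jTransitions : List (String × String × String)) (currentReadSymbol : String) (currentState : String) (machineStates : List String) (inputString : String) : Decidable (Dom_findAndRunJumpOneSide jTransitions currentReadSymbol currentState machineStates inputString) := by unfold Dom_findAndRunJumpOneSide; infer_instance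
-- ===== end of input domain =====

-- B replaces A's flag-carrying accumulator loop by find-first-index-then-slice (simpler); return value only.

-- ===== PORT A =====
def findAndRunJumpOneSide (jTransitions : List (String × String × String)) (currentReadSymbol : String) (currentState : String) (machineStates : List String) (inputString : String) : String × String :=
  -- for entry in jTransitions: if entry[0] == currentState and entry[1] in inputString: append
  let listOfEndpoints := jTransitions.foldl
    (fun acc entry =>
      if entry.1 == currentState && PySem.Str.isIn entry.2.1 inputString then acc ++ [entry] else acc) []
  match listOfEndpoints.head? with
  | none => ("", "")   -- Python raises IndexError at listOfEndpoints[0]; excluded by Pre_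
  | some e =>
    let currentState' := e.2.2
    let currentReadSymbol' := e.2.1
    -- outputString = ""; symbolReached = False; for symbol in inputString: ...
    let st := inputString.toList.foldl
      (fun (st : List Char × Bool) symbol =>
        (if st.2 then st.1 ++ [symbol] else st.1,
         if String.ofList [symbol] == currentReadSymbol' then true else st.2))
      ([], false)
    (String.ofList st.1, currentState')

-- ===== PORT B =====
def findAndRunJumpOneSide_alt (jTransitions : List (String × String × String)) (currentReadSymbol : String) (currentState : String) (machineStates : List String) (inputString : String) : String × String :=
  let hits := jTransitions.filter
    (fun e => e.1 == currentState && PySem.Str.isIn e.2.1 inputString)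
  match hits.head? with
  | none => ("", "")   -- Python raises IndexError at hits[0]; excluded by Pre_
  | some e =>
    let sym := e.2.1
    -- i = next((k for k, c in enumerate(inputString) if c == sym), None)
    match inputString.toList.findIdx? (fun c => String.ofList [c] == sym) with
    | some k => (String.ofList (inputString.toList.drop (k + 1)), e.2.2)  -- inputString[i+1:]
    | none => ("", e.2.2)

-- ===== PRECONDITION & SPEC =====
-- Pre_ excludes exactly the inputs with no transition matching (state, symbol-in-input):
-- there A raises IndexError at listOfEndpoints[0] (and B raises the same at hits[0]).
def Pre_findAndRunJumpOneSide (jTransitions : List (String × String × String)) (currentReadSymbol : String) (currentState : String) (machineStates : List String) (inputString : String) : Prop :=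
  jTransitions.any (fun e => e.1 == currentState && PySem.Str.isIn e.2.1 inputString) = true
instance (jTransitions : List (String × String × String)) (currentReadSymbol : String) (currentState : String) (machineStates : List String) (inputString : String) : Decidable (Pre_findAndRunJumpOneSide jTransitions currentReadSymbol currentState machineStates inputString) := by unfold Pre_findAndRunJumpOneSide; infer_instance

def pvWitness_findAndRunJumpOneSide : (List (String × String × String)) × String × String × List String × String :=
  ([("q0", "a", "q1")], "a", "q0", ["q1"], "xaby")

def Spec_findAndRunJumpOneSide (jTransitions : List (String × String × String)) (currentReadSymbol : String) (currentState : String) (machineStates : List String) (inputString : String) (out : String × String) : Prop := out = findAndRunJumpOneSide_alt jTransitions currentReadSymbol currentState machineStates inputString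
instance (jTransitions : List (String × String × String)) (currentReadSymbol : String) (currentState : String) (machineStates : List String) (inputString : String) (out : String × String) : Decidable (Spec_findAndRunJumpOneSide jTransitions currentReadSymbol currentState machineStates inputString out) := by unfold Spec_findAndRunJumpOneSide; infer_instance

-- ===== CLAIM (what is proved, stated in full; the proofs are below) =====
def Claim_equal_findAndRunJumpOneSide : Prop := ∀ (jTransitions : List (String × String × String)) (currentReadSymbol : String) (currentState : String) (machineStates : List String) (inputString : String), Dom_findAndRunJumpOneSide jTransitions currentReadSymbol currentState machineStates inputString → Pre_findAndRunJumpOneSide jTransitions currentReadSymbol currentState machineStates inputString → Spec_findAndRunJumpOneSide jTransitions currentReadSymbol currentState machineStates inputString (findAndRunJumpOneSide jTransitions currentReadSymbol currentState machineStates inputString)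

-- ===== LEMMAS AND PROOFS =====

-- the body of A's for-loop, named so rewriting cannot disturb it
def flagStep (p : Char → Bool) (st : List Char × Bool) (c : Char) : List Char × Bool :=
  (if st.2 then st.1 ++ [c] else st.1, if p c then true else st.2)

-- A's flag loop with the flag already set appends the whole rest of the string.
theorem fold_flag_true (p : Char → Bool) :
    ∀ (l acc : List Char), l.foldl (flagStep p) (acc, true) = (acc ++ l, true) := by
  intro l
  induction l with
  | nil => simp
  | cons c t ih =>
    intro acc
    rw [List.foldl_cons]
    have hs : flagStep p (acc, true) c = (acc ++ [c], true) := by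
      unfold flagStep; simp
    rw [hs, ih]; simp

-- A's flag loop from the initial (empty, false) state computes B's find-then-drop.
theorem fold_flag_false (p : Char → Bool) :
    ∀ (l : List Char),
      (l.foldl (flagStep p) ([], false)).1
      = (match l.findIdx? p with
         | some k => l.drop (k + 1)
         | none => ([] : List Char)) := by
  intro l
  induction l with
  | nil => simp
  | cons c t ih =>
    rw [List.foldl_cons, List.findIdx?_cons]
    by_cases h : p c
    · have hs : flagStep p ([], false) c = ([], true) := by
        unfold flagStep; simp [h]
      rw [hs, fold_flag_true p t [], if_pos h]
      simp
    · have hs : flagStep p ([], false) c = ([], false) := by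
        unfold flagStep; simp [h]
      rw [hs, ih, if_neg h]
      cases t.findIdx? p <;> simp

-- ===== VERDICT (by name: the statement is the Claim_ definition above) =====
theorem findAndRunJumpOneSide_spec : Claim_equal_findAndRunJumpOneSide := by
  intro jT crs cs ms inp _ _
  show _ = _
  unfold findAndRunJumpOneSide findAndRunJumpOneSide_alt
  rw [PySem.List.foldl_append_if_eq_filter]
  simp only [List.nil_append]
  cases h : (jT.filter (fun e => e.1 == cs && PySem.Str.isIn e.2.1 inp)).head? with
  | none => rfl
  | some e =>
    simp only []
    have hfun : (fun (st : List Char × Bool) (symbol : Char) =>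
          (if st.2 = true then st.1 ++ [symbol] else st.1,
           if (String.ofList [symbol] == e.2.1) = true then true else st.2))
        = flagStep (fun c => String.ofList [c] == e.2.1) := rfl
    rw [hfun, fold_flag_false (fun c => String.ofList [c] == e.2.1) inp.toList]
    cases inp.toList.findIdx? (fun c => String.ofList [c] == e.2.1) <;> rfl
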